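-- pv_equiv track=rewrite | github.com/kos-sandra/learning | acmp/acmp_task_039.py | strategy_max_and_next_max
-- ===== SOURCE A (Python) =====
-- def find_index_max(lst):
--     index_mmx = 0
--     for i in range(len(lst)):
--         if lst[i] >= lst[index_mmx]:
--             index_mmx = i
--     return index_mmx
--
-- def strategy_max_and_next_max(rates):
--     total = 0
--     while len(rates) > 0:
--         hair_len = find_index_max(rates) + 1
--         max_rate = rates[hair_len - 1]
--         total += max_rate * hair_len
--         rates = rates[hair_len:]
--     return total
-- ===== SOURCE B (Python) =====
-- def strategy_max_and_next_max(rates):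
--     # One right-to-left pass: each element contributes the max of its suffix,
--     # which equals the max of the greedy block it falls into.
--     total = 0
--     m = None
--     for x in reversed(rates):
--         if m is None or x > m:
--             m = x
--         total += m
--     return total
-- ===== Notes on version B (the rewrite author's own statement) =====
-- stated objective: faster
-- what changed: Replaced the repeated last-argmax scan + list slicing with a single right-to-left pass that adds the running suffix maximum for each position (each position's block maximum is its suffix maximum).
import Mathlib
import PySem

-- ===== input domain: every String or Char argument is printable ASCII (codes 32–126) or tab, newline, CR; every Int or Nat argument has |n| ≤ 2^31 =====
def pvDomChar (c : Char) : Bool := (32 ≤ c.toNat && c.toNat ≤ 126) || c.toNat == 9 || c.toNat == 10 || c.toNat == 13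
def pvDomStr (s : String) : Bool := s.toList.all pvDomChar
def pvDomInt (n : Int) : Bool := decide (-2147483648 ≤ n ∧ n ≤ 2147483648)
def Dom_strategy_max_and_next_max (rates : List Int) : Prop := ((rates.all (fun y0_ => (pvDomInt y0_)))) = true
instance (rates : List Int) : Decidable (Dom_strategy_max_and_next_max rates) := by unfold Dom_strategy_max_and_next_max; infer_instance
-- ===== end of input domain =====

-- B replaces A's O(n^2) repeated last-argmax scan + slicing with a single O(n)
-- right-to-left pass adding the running suffix maximum (objective: faster).

-- ===== PORT A =====
def find_index_max (lst : List Int) : Int :=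
  (PySem.List.pyRange 0 (lst.length : Int) 1).foldl
    (fun index_mmx i =>
      if PySem.List.pyGetD lst i 0 ≥ PySem.List.pyGetD lst index_mmx 0 then i else index_mmx) 0

-- fold invariant of find_index_max's loop; its nonnegativity part justifies
-- the termination of strategy_loop below (cited in decreasing_by).
lemma fim_fold_inv (lst : List Int) :
    ∀ (l : List Int) (acc : Int), 0 ≤ acc → (∀ i ∈ l, 0 ≤ i) →
      0 ≤ l.foldl (fun index_mmx i =>
            if PySem.List.pyGetD lst i 0 ≥ PySem.List.pyGetD lst index_mmx 0 then i else index_mmx) acc ∧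
      (l.foldl (fun index_mmx i =>
            if PySem.List.pyGetD lst i 0 ≥ PySem.List.pyGetD lst index_mmx 0 then i else index_mmx) acc = acc ∨
       l.foldl (fun index_mmx i =>
            if PySem.List.pyGetD lst i 0 ≥ PySem.List.pyGetD lst index_mmx 0 then i else index_mmx) acc ∈ l) ∧
      (∀ i ∈ l, PySem.List.pyGetD lst i 0 ≤
         PySem.List.pyGetD lst (l.foldl (fun index_mmx i =>
            if PySem.List.pyGetD lst i 0 ≥ PySem.List.pyGetD lst index_mmx 0 then i else index_mmx) acc) 0) ∧
      PySem.List.pyGetD lst acc 0 ≤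
         PySem.List.pyGetD lst (l.foldl (fun index_mmx i =>
            if PySem.List.pyGetD lst i 0 ≥ PySem.List.pyGetD lst index_mmx 0 then i else index_mmx) acc) 0 := by
  intro l
  induction l with
  | nil => intro acc h _; exact ⟨h, Or.inl rfl, by simp, le_refl _⟩
  | cons y t ih =>
    intro acc hacc hl
    simp only [List.foldl_cons]
    have hy : 0 ≤ y := hl y (by simp)
    have hacc' : 0 ≤ (if PySem.List.pyGetD lst y 0 ≥ PySem.List.pyGetD lst acc 0 then y else acc) := by
      split_ifs <;> [exact hy; exact hacc]
    obtain ⟨h1, h2, h3, h4⟩ := ih _ hacc' (fun i hi => hl i (by simp [hi]))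
    refine ⟨h1, ?_, ?_, ?_⟩
    · rcases h2 with h2 | h2
      · by_cases hc : PySem.List.pyGetD lst y 0 ≥ PySem.List.pyGetD lst acc 0
        · rw [if_pos hc] at h2 ⊢; right; rw [h2]; simp
        · rw [if_neg hc] at h2 ⊢; left; exact h2
      · right; simp [h2]
    · intro i hi
      rcases List.mem_cons.1 hi with rfl | hi
      · refine le_trans ?_ h4
        split_ifs with hc
        · exact le_refl _
        · exact le_of_lt (lt_of_not_ge hc)
      · exact h3 i hi
    · refine le_trans ?_ h4
      split_ifs with hc
      · exact hc
      · exact le_refl _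

lemma find_index_max_nonneg (lst : List Int) : 0 ≤ find_index_max lst := by
  unfold find_index_max
  exact (fim_fold_inv lst (PySem.List.pyRange 0 (lst.length : Int) 1) 0 le_rfl
    (fun i hi => ((PySem.List.mem_pyRange_one).1 hi).1)).1

def strategy_loop (rates : List Int) (total : Int) : Int :=
  if h : 0 < rates.length then
    let hair_len := find_index_max rates + 1
    let max_rate := PySem.List.pyGetD rates (hair_len - 1) 0
    strategy_loop (PySem.List.slice rates (some hair_len) none) (total + max_rate * hair_len)
  else total
termination_by rates.length
decreasing_by
  have h0 : 0 ≤ find_index_max rates := find_index_max_nonneg rates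
  rw [PySem.List.slice_from _ (by omega : (0:Int) ≤ find_index_max rates + 1)]
  simp only [List.length_drop]
  omega

def strategy_max_and_next_max (rates : List Int) : Int := strategy_loop rates 0

-- ===== PORT B =====
def altStep (st : Int × Option Int) (x : Int) : Int × Option Int :=
  match st.2 with
  | none => (st.1 + x, some x)
  | some m => let m' := if x > m then x else m; (st.1 + m', some m')

def strategy_max_and_next_max_alt (rates : List Int) : Int :=
  (rates.reverse.foldl altStep ((0 : Int), (none : Option Int))).1

-- ===== PRECONDITION & SPEC =====
def Spec_strategy_max_and_next_max (rates : List Int) (out : Int) : Prop := out = strategy_max_and_next_max_alt rates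
instance (rates : List Int) (out : Int) : Decidable (Spec_strategy_max_and_next_max rates out) := by unfold Spec_strategy_max_and_next_max; infer_instance

-- ===== CLAIM (what is proved, stated in full; the proofs are below) =====
def Claim_equal_strategy_max_and_next_max : Prop := ∀ (rates : List Int), Dom_strategy_max_and_next_max rates → Spec_strategy_max_and_next_max rates (strategy_max_and_next_max rates)

-- ===== LEMMAS AND PROOFS =====

-- sum over all positions of the maximum of the suffix starting there
def blockSum : List Int → Int
  | [] => 0
  | x :: xs => xs.foldl max x + blockSum xs

def maxOf : List Int → Option Int
  | [] => none
  | x :: t => some (t.foldl max x)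

lemma foldl_max_swap : ∀ (l : List Int) (a b : Int), l.foldl max (max a b) = max (l.foldl max a) b := by
  intro l
  induction l with
  | nil => intro a b; rfl
  | cons c l ih =>
    intro a b
    simp only [List.foldl_cons]
    rw [max_right_comm a b c, ih]

lemma alt_fold (xs : List Int) :
    xs.reverse.foldl altStep ((0 : Int), (none : Option Int)) = (blockSum xs, maxOf xs) := by
  induction xs with
  | nil => rfl
  | cons x t ih =>
    rw [List.reverse_cons, List.foldl_append, ih]
    simp only [List.foldl_cons, List.foldl_nil]
    cases t with
    | nil => simp [altStep, blockSum, maxOf]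
    | cons z zs =>
      simp only [altStep, maxOf, blockSum, List.foldl_cons]
      have hm : (if x > zs.foldl max z then x else zs.foldl max z) = zs.foldl max (max x z) := by
        rw [max_comm x z, foldl_max_swap]
        by_cases h : x > zs.foldl max z
        · rw [if_pos h, max_eq_right h.le]
        · rw [if_neg h, max_eq_left (not_lt.1 h)]
      simp only [hm]
      rw [Prod.mk.injEq]
      exact ⟨by ring, rfl⟩

lemma foldl_max_of_le : ∀ (l : List Int) (a : Int), (∀ y ∈ l, y ≤ a) → l.foldl max a = a := by
  intro l
  induction l with
  | nil => intro a _; rfl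
  | cons y t ih =>
    intro a h
    simp only [List.foldl_cons]
    rw [max_eq_left (h y (by simp))]
    exact ih a (fun z hz => h z (by simp [hz]))

lemma foldl_max_eq_of_mem : ∀ (l : List Int) (a m : Int), m ∈ l → a ≤ m → (∀ y ∈ l, y ≤ m) → l.foldl max a = m := by
  intro l
  induction l with
  | nil => intro a m hm; exact absurd hm (by simp)
  | cons y t ih =>
    intro a m hm ha hall
    simp only [List.foldl_cons]
    by_cases ht : m ∈ t
    · exact ih _ m ht (max_le ha (hall y (by simp))) (fun z hz => hall z (by simp [hz]))
    · have hy : m = y := by rcases List.mem_cons.1 hm with h | h; exact h; exact absurd h ht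
      subst hy
      rw [max_eq_right ha]
      exact foldl_max_of_le t m (fun z hz => hall z (by simp [hz]))

lemma blockSum_split : ∀ (k : Nat) (xs : List Int), k < xs.length →
    (∀ x ∈ xs, x ≤ xs.getD k 0) →
    blockSum xs = xs.getD k 0 * ((k : Int) + 1) + blockSum (xs.drop (k + 1)) := by
  intro k
  induction k with
  | zero =>
    intro xs hk hmax
    cases xs with
    | nil => simp at hk
    | cons x rest =>
      simp only [List.getD_cons_zero] at hmax ⊢
      simp only [blockSum, List.drop_succ_cons, List.drop_zero]
      rw [foldl_max_of_le rest x (fun y hy => hmax y (by simp [hy]))]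
      ring
  | succ k ih =>
    intro xs hk hmax
    cases xs with
    | nil => simp at hk
    | cons x rest =>
      simp only [List.length_cons] at hk
      have hk' : k < rest.length := by omega
      simp only [List.getD_cons_succ] at hmax ⊢
      have hmem : rest.getD k 0 ∈ rest := by
        rw [List.getD_eq_getElem rest 0 hk']; exact List.getElem_mem hk'
      simp only [blockSum, List.drop_succ_cons]
      rw [ih rest hk' (fun y hy => hmax y (by simp [hy]))]
      rw [foldl_max_eq_of_mem rest x (rest.getD k 0) hmem (hmax x (by simp))
        (fun y hy => hmax y (by simp [hy]))]
      push_cast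
      ring

lemma find_index_max_lt (lst : List Int) (h : 0 < lst.length) :
    find_index_max lst < (lst.length : Int) := by
  unfold find_index_max
  have := (fim_fold_inv lst (PySem.List.pyRange 0 (lst.length : Int) 1) 0 le_rfl
    (fun i hi => ((PySem.List.mem_pyRange_one).1 hi).1)).2.1
  rcases this with h2 | h2
  · rw [h2]; exact_mod_cast h
  · exact ((PySem.List.mem_pyRange_one).1 h2).2

lemma find_index_max_ge (lst : List Int) :
    ∀ x ∈ lst, x ≤ PySem.List.pyGetD lst (find_index_max lst) 0 := by
  intro x hx
  obtain ⟨j, hj, rfl⟩ := List.mem_iff_getElem.1 hx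
  have hmem : (j : Int) ∈ PySem.List.pyRange 0 (lst.length : Int) 1 := by
    rw [PySem.List.mem_pyRange_one]
    constructor <;> [positivity; exact_mod_cast hj]
  have := (fim_fold_inv lst (PySem.List.pyRange 0 (lst.length : Int) 1) 0 le_rfl
    (fun i hi => ((PySem.List.mem_pyRange_one).1 hi).1)).2.2.1 (j : Int) hmem
  unfold find_index_max
  rw [PySem.List.pyGetD_natCast, List.getD_eq_getElem lst 0 hj] at this
  exact this

lemma strategy_loop_eq : ∀ (n : Nat) (rates : List Int), rates.length ≤ n →
    ∀ total, strategy_loop rates total = total + blockSum rates := by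
  intro n
  induction n with
  | zero =>
    intro rates hlen total
    have : rates = [] := List.length_eq_zero_iff.1 (by omega)
    subst this
    rw [strategy_loop]
    simp [blockSum]
  | succ n ih =>
    intro rates hlen total
    rw [strategy_loop]
    by_cases h : 0 < rates.length
    · simp only [dif_pos h]
      have h0 : 0 ≤ find_index_max rates := find_index_max_nonneg rates
      have h1 : find_index_max rates < (rates.length : Int) := find_index_max_lt rates h
      set k : Nat := (find_index_max rates).toNat with hkdef
      have hkc : (k : Int) = find_index_max rates := Int.toNat_of_nonneg h0
      have hklt : k < rates.length := by omega
      rw [PySem.List.slice_from _ (by omega : (0:Int) ≤ find_index_max rates + 1)]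
      have htn : (find_index_max rates + 1).toNat = k + 1 := by omega
      rw [htn]
      have hdl : (rates.drop (k + 1)).length ≤ n := by
        simp only [List.length_drop]; omega
      rw [ih (rates.drop (k + 1)) hdl]
      have hget : PySem.List.pyGetD rates (find_index_max rates + 1 - 1) 0 = rates.getD k 0 := by
        rw [show find_index_max rates + 1 - 1 = ((k : Int)) by omega]
        exact PySem.List.pyGetD_natCast rates k 0
      have hmax : ∀ x ∈ rates, x ≤ rates.getD k 0 := by
        intro x hx
        have := find_index_max_ge rates x hx
        rwa [← hkc, PySem.List.pyGetD_natCast] at this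
      rw [hget, blockSum_split k rates hklt hmax]
      rw [show find_index_max rates + 1 = (k : Int) + 1 by omega]
      ring
    · simp only [dif_neg h]
      have : rates = [] := List.length_eq_zero_iff.1 (by omega)
      subst this
      simp [blockSum]

-- ===== VERDICT (by name: the statement is the Claim_ definition above) =====
theorem strategy_max_and_next_max_spec : Claim_equal_strategy_max_and_next_max := by
  intro rates _
  unfold Spec_strategy_max_and_next_max strategy_max_and_next_max strategy_max_and_next_max_alt
  rw [alt_fold, strategy_loop_eq rates.length rates le_rfl 0]
  simp
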